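-- pv_equiv track=rewrite | github.com/du2lee/BOJ | programmers/완점탐색/모의고사.py | solution
-- ===== SOURCE A (Python) =====
-- def solution(answers):
--     answer = []
--
--     counts = [0 ,0, 0]
--
--     for idx in range(len(answers)):
--         a = answers[idx]
--
--         # 1번학생
--         if a == idx % 5 + 1:
--             counts[0] += 1
--
--         # 2번학생
--         arr = [2, 1, 2, 3, 2, 4, 2, 5]
--         if a == arr[idx % 8]: counts[1] += 1
--
--         # 3번학생
--         arr = [3, 3, 1, 1, 2, 2, 4, 4, 5, 5]
--         if a == arr[idx % 10]: counts[2] += 1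
--
--     cache = -1
--
--     for idx in range(3):
--         if cache < counts[idx]:
--             cache = counts[idx]
--             answer = []
--             answer.append(idx + 1)
--         elif cache == counts[idx]:
--             answer.append(idx + 1)
--     return answer
-- ===== SOURCE B (Python) =====
-- PATTERNS = [[1, 2, 3, 4, 5], [2, 1, 2, 3, 2, 4, 2, 5], [3, 3, 1, 1, 2, 2, 4, 4, 5, 5]]
--
--
-- def solution(answers):
--     # One pass builds a histogram keyed by (index mod 40, answer); 40 = lcm of the
--     # pattern lengths, so each student's score is a fixed 40-term table sum.
--     hist = {}
--     for i, a in enumerate(answers):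
--         k = (i % 40, a)
--         hist[k] = hist.get(k, 0) + 1
--     scores = [sum(hist.get((r, p[r % len(p)]), 0) for r in range(40)) for p in PATTERNS]
--     best = max(scores)
--     return [j + 1 for j, s in enumerate(scores) if s == best]
-- ===== Notes on version B (the rewrite author's own statement) =====
-- stated objective: alternative
-- what changed: B replaces A's interleaved per-student counting loop plus running-max rebuild loop by a single pass building a histogram keyed by (index mod 40, answer) — 40 being the lcm of the three pattern lengths — from which each student's score is a fixed 40-term table sum, then selects winners by max(scores) and a filter.
import Mathlib
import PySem

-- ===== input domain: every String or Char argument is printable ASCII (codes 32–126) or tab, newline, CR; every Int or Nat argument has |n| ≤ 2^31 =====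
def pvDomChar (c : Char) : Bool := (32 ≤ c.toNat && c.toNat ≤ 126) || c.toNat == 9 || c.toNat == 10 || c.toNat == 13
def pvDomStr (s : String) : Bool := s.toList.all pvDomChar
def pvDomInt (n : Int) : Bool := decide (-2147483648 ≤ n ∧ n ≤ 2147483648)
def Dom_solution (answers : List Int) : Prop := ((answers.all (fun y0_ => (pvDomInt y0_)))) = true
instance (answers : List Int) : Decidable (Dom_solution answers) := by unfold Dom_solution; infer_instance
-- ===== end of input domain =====

-- B replaces A's interleaved per-student counting loop and running-max rebuild loop by a single
-- histogram pass keyed by (index mod 40, answer) — 40 = lcm of the pattern lengths — from which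
-- each score is a fixed 40-term table sum, followed by max-then-filter selection (objective: alternative).

-- ===== PORT A =====
-- counts = [0,0,0] is a fixed-size list; ported as a triple.  answers[idx] with idx ∈ range(len)
-- is always in range, ported with pyGetD (exact here); likewise arr[idx % 8] / arr[idx % 10].
def solution (answers : List Int) : List Int :=
  let counts :=
    (PySem.List.pyRange 0 (PySem.List.len answers) 1).foldl
      (fun (c : Int × Int × Int) idx =>
        let a := PySem.List.pyGetD answers idx 0
        let c := if a = PySem.Int.mod idx 5 + 1 then (c.1 + 1, c.2.1, c.2.2) else c
        let arr2 : List Int := [2, 1, 2, 3, 2, 4, 2, 5]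
        let c := if a = PySem.List.pyGetD arr2 (PySem.Int.mod idx 8) 0 then (c.1, c.2.1 + 1, c.2.2) else c
        let arr3 : List Int := [3, 3, 1, 1, 2, 2, 4, 4, 5, 5]
        if a = PySem.List.pyGetD arr3 (PySem.Int.mod idx 10) 0 then (c.1, c.2.1, c.2.2 + 1) else c)
      (0, 0, 0)
  let sel :=
    (PySem.List.pyRange 0 3 1).foldl
      (fun (st : Int × List Int) idx =>
        let cnt := PySem.List.pyGetD [counts.1, counts.2.1, counts.2.2] idx 0
        if st.1 < cnt then (cnt, [idx + 1])
        else if st.1 = cnt then (st.1, st.2 ++ [idx + 1])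
        else st)
      (-1, [])
  sel.2

-- ===== PORT B =====
def pvPatterns : List (List Int) :=
  [[1, 2, 3, 4, 5], [2, 1, 2, 3, 2, 4, 2, 5], [3, 3, 1, 1, 2, 2, 4, 4, 5, 5]]

-- hist[k] = hist.get(k, 0) + 1 is Dict.insert with getD; p[r % len(p)] for r in range(40) is
-- always in range (exact pyGetD); max(scores) on the nonempty 3-list ported as (max? …).getD 0
-- (exact: never none); the 0/1 bool sum is the if-then-else sum.
def solution_alt (answers : List Int) : List Int :=
  let hist :=
    (PySem.List.enumerate answers 0).foldl
      (fun (d : PySem.Dict (Int × Int) Int) (pr : Int × Int) =>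
        let k := (PySem.Int.mod pr.1 40, pr.2)
        d.insert k (d.getD k 0 + 1))
      PySem.Dict.empty
  let score := fun (p : List Int) =>
    (PySem.List.pyRange 0 40 1).foldl
      (fun (s : Int) r =>
        s + hist.getD (r, PySem.List.pyGetD p (PySem.Int.mod r (PySem.List.len p)) 0) 0)
      0
  let scores := pvPatterns.map score
  let best := (PySem.List.max? scores (fun x => x)).getD 0
  (PySem.List.enumerate scores 0).filterMap
    (fun (pr : Int × Int) => if pr.2 = best then some (pr.1 + 1) else none)

-- ===== PRECONDITION & SPEC =====
def Spec_solution (answers : List Int) (out : List Int) : Prop := out = solution_alt answers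
instance (answers : List Int) (out : List Int) : Decidable (Spec_solution answers out) := by unfold Spec_solution; infer_instance

-- ===== CLAIM (what is proved, stated in full; the proofs are below) =====
def Claim_equal_solution : Prop := ∀ (answers : List Int), Dom_solution answers → Spec_solution answers (solution answers)

-- ===== LEMMAS AND PROOFS =====

-- Direct per-pattern scoring step on an (index, answer) pair (the count both programs realise).
def pvG (p : List Int) (s : Int) (pr : Int × Int) : Int :=
  s + (if pr.2 = PySem.List.pyGetD p (PySem.Int.mod pr.1 (PySem.List.len p)) 0 then 1 else 0)

-- A's combined counting step on an (index, answer) pair.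
def pvStepA (c : Int × Int × Int) (pr : Int × Int) : Int × Int × Int :=
  let a := pr.2
  let c := if a = PySem.Int.mod pr.1 5 + 1 then (c.1 + 1, c.2.1, c.2.2) else c
  let c := if a = PySem.List.pyGetD [2, 1, 2, 3, 2, 4, 2, 5] (PySem.Int.mod pr.1 8) 0 then (c.1, c.2.1 + 1, c.2.2) else c
  if a = PySem.List.pyGetD [3, 3, 1, 1, 2, 2, 4, 4, 5, 5] (PySem.Int.mod pr.1 10) 0 then (c.1, c.2.1, c.2.2 + 1) else c

-- B's histogram step: bump the count of key (i mod 40, a).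
def pvHStep (d : PySem.Dict (Int × Int) Int) (pr : Int × Int) : PySem.Dict (Int × Int) Int :=
  d.insert (PySem.Int.mod pr.1 40, pr.2) (d.getD (PySem.Int.mod pr.1 40, pr.2) 0 + 1)

-- B's 40-term table sum for pattern p over histogram d.
def pvS (p : List Int) (d : PySem.Dict (Int × Int) Int) : Int :=
  (PySem.List.pyRange 0 40 1).foldl
    (fun (s : Int) r =>
      s + d.getD (r, PySem.List.pyGetD p (PySem.Int.mod r (PySem.List.len p)) 0) 0)
    0

-- On nonnegative indices, student 1's formula idx % 5 + 1 is exactly a lookup in [1,2,3,4,5].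
lemma pv_pat1_getD (i : Int) :
    PySem.List.pyGetD ([1, 2, 3, 4, 5] : List Int) (PySem.Int.mod i 5) 0 = PySem.Int.mod i 5 + 1 := by
  rw [PySem.Int.mod_eq_emod_of_pos (by norm_num)]
  have h0 : 0 ≤ i % 5 := Int.emod_nonneg i (by norm_num)
  have h5 : i % 5 < 5 := Int.emod_lt_of_pos i (by norm_num)
  set r := i % 5 with hr
  interval_cases r <;> decide

lemma pv_stepA_eq (c : Int × Int × Int) (pr : Int × Int) :
    pvStepA c pr = (pvG [1, 2, 3, 4, 5] c.1 pr, pvG [2, 1, 2, 3, 2, 4, 2, 5] c.2.1 pr,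
      pvG [3, 3, 1, 1, 2, 2, 4, 4, 5, 5] c.2.2 pr) := by
  simp only [pvStepA, pvG, PySem.List.len, ← pv_pat1_getD pr.1]
  norm_num
  split_ifs <;> simp

lemma pv_fold_split (l : List (Int × Int)) (c0 c1 c2 : Int) :
    l.foldl pvStepA (c0, c1, c2) =
      (l.foldl (pvG [1, 2, 3, 4, 5]) c0, l.foldl (pvG [2, 1, 2, 3, 2, 4, 2, 5]) c1,
        l.foldl (pvG [3, 3, 1, 1, 2, 2, 4, 4, 5, 5]) c2) := by
  induction l generalizing c0 c1 c2 with
  | nil => rfl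
  | cons pr t ih => simp only [List.foldl_cons, pv_stepA_eq]; exact ih _ _ _

lemma pv_score_nonneg (p : List Int) (l : List (Int × Int)) (c : Int) (h : 0 ≤ c) :
    0 ≤ l.foldl (pvG p) c := by
  induction l generalizing c with
  | nil => exact h
  | cons pr t ih => exact ih _ (by simp only [pvG]; split_ifs <;> omega)

-- Composing Python mod by 40 with mod by a positive divisor of 40.
lemma pv_mod_mod (i L : Int) (hL : 0 < L) (hdvd : L ∣ 40) :
    PySem.Int.mod (PySem.Int.mod i 40) L = PySem.Int.mod i L := by
  rw [PySem.Int.mod_eq_emod_of_pos (by norm_num : (0:Int) < 40),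
      PySem.Int.mod_eq_emod_of_pos hL, PySem.Int.mod_eq_emod_of_pos hL]
  exact Int.emod_emod_of_dvd i hdvd

-- One histogram bump shifts the 40-term table sum by exactly the match indicator.
lemma pv_S_step (p : List Int) (d : PySem.Dict (Int × Int) Int) (i a : Int) :
    pvS p (pvHStep d (i, a)) =
      pvS p d +
        (if a = PySem.List.pyGetD p (PySem.Int.mod (PySem.Int.mod i 40) (PySem.List.len p)) 0
         then 1 else 0) := by
  have hm0 : 0 ≤ PySem.Int.mod i 40 := PySem.Int.mod_nonneg i (by norm_num)
  have hm40 : PySem.Int.mod i 40 < 40 := PySem.Int.mod_lt i (by norm_num)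
  set m := PySem.Int.mod i 40 with hm
  have hpt : ∀ r : Int,
      (pvHStep d (i, a)).getD (r, PySem.List.pyGetD p (PySem.Int.mod r (PySem.List.len p)) 0) 0 =
        d.getD (r, PySem.List.pyGetD p (PySem.Int.mod r (PySem.List.len p)) 0) 0 +
          (if (r, PySem.List.pyGetD p (PySem.Int.mod r (PySem.List.len p)) 0) = (m, a)
           then (1 : Int) else 0) := by
    intro r
    simp only [pvHStep, PySem.Dict.getD_insert, ← hm]
    split_ifs with h
    · rw [h]
    · omega
  have hsplit : PySem.List.pyRange 0 40 1 =
      PySem.List.pyRange 0 m 1 ++ (m :: PySem.List.pyRange (m + 1) 40 1) := by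
    rw [PySem.List.pyRange_one_append 0 m 40 hm0 (by omega),
        PySem.List.pyRange_one_cons (show m < 40 from hm40)]
  unfold pvS
  rw [PySem.List.foldl_add, PySem.List.foldl_add]
  simp only [hpt]
  rw [PySem.List.sum_map_add_int, hsplit]
  simp only [List.map_append, List.sum_append, List.map_cons, List.sum_cons]
  have hleft : (List.map
      (fun r => if (r, PySem.List.pyGetD p (PySem.Int.mod r (PySem.List.len p)) 0) = (m, a) then (1:Int) else 0)
      (PySem.List.pyRange 0 m 1)).sum = 0 := by
    apply List.sum_eq_zero
    intro x hx
    simp only [List.mem_map] at hx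
    obtain ⟨r, hr, hxe⟩ := hx
    have := (PySem.List.mem_pyRange_one).1 hr
    rw [← hxe, if_neg]
    simp only [Prod.mk.injEq, not_and]
    intro hrm; omega
  have hright : (List.map
      (fun r => if (r, PySem.List.pyGetD p (PySem.Int.mod r (PySem.List.len p)) 0) = (m, a) then (1:Int) else 0)
      (PySem.List.pyRange (m + 1) 40 1)).sum = 0 := by
    apply List.sum_eq_zero
    intro x hx
    simp only [List.mem_map] at hx
    obtain ⟨r, hr, hxe⟩ := hx
    have := (PySem.List.mem_pyRange_one).1 hr
    rw [← hxe, if_neg]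
    simp only [Prod.mk.injEq, not_and]
    intro hrm; omega
  rw [hleft, hright]
  simp only [Prod.mk.injEq, true_and]
  split_ifs <;> omega

lemma pv_S_empty (p : List Int) : pvS p PySem.Dict.empty = 0 := by
  unfold pvS
  rw [PySem.List.foldl_add]
  simp [PySem.Dict.getD_empty]

-- Building the histogram over a list and reading the table equals the direct scoring fold.
lemma pv_fold_hist (p : List Int) (hL : 0 < PySem.List.len p) (hdvd : PySem.List.len p ∣ 40)
    (l : List (Int × Int)) (d : PySem.Dict (Int × Int) Int) :
    pvS p (l.foldl pvHStep d) = l.foldl (pvG p) (pvS p d) := by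
  induction l generalizing d with
  | nil => rfl
  | cons pr t ih =>
    simp only [List.foldl_cons]
    rw [ih]
    congr 1
    rw [show pr = (pr.1, pr.2) from rfl, pv_S_step, pv_mod_mod pr.1 _ hL hdvd]
    rfl

-- A's running-max/rebuild loop over three counts equals max-then-filter selection.
lemma pv_sel_eq (c0 c1 c2 : Int) (h0 : 0 ≤ c0) :
    ((PySem.List.pyRange 0 3 1).foldl
      (fun (st : Int × List Int) idx =>
        let cnt := PySem.List.pyGetD [c0, c1, c2] idx 0
        if st.1 < cnt then (cnt, [idx + 1])
        else if st.1 = cnt then (st.1, st.2 ++ [idx + 1])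
        else st)
      (-1, ([] : List Int))).2 =
    (PySem.List.enumerate [c0, c1, c2] 0).filterMap
      (fun (pr : Int × Int) =>
        if pr.2 = (PySem.List.max? [c0, c1, c2] (fun x => x)).getD 0 then some (pr.1 + 1) else none) := by
  have hr : PySem.List.pyRange 0 3 1 = [0, 1, 2] := by decide
  rw [hr, PySem.List.max?_id_cons]
  simp only [List.foldl_cons, List.foldl_nil, PySem.List.enumerate_cons, PySem.List.enumerate_nil,
    List.filterMap_cons, List.filterMap_nil, Option.getD_some,
    PySem.List.pyGetD_zero_cons]
  have g1 : PySem.List.pyGetD [c0, c1, c2] 1 0 = c1 := by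
    simp [PySem.List.pyGetD, PySem.List.pyIdx?, PySem.List.pyGet?]
  have g2 : PySem.List.pyGetD [c0, c1, c2] 2 0 = c2 := by
    simp [PySem.List.pyGetD, PySem.List.pyIdx?, PySem.List.pyGet?]
  rw [g1, g2]
  split_ifs <;> first | rfl | omega

-- B unfolded: histogram table sums in place of the inline lets (definitional).
lemma pv_alt_unfold (answers : List Int) :
    solution_alt answers =
      (PySem.List.enumerate
        (pvPatterns.map (fun p => pvS p ((PySem.List.enumerate answers 0).foldl pvHStep PySem.Dict.empty))) 0).filterMap
        (fun (pr : Int × Int) =>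
          if pr.2 = (PySem.List.max?
              (pvPatterns.map (fun p => pvS p ((PySem.List.enumerate answers 0).foldl pvHStep PySem.Dict.empty)))
              (fun x => x)).getD 0
          then some (pr.1 + 1) else none) := rfl

-- B's scores are the direct per-pattern counts.
lemma pv_alt_eq (answers : List Int) :
    solution_alt answers =
      (PySem.List.enumerate
        [(PySem.List.enumerate answers 0).foldl (pvG [1, 2, 3, 4, 5]) 0,
         (PySem.List.enumerate answers 0).foldl (pvG [2, 1, 2, 3, 2, 4, 2, 5]) 0,
         (PySem.List.enumerate answers 0).foldl (pvG [3, 3, 1, 1, 2, 2, 4, 4, 5, 5]) 0] 0).filterMap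
        (fun (pr : Int × Int) =>
          if pr.2 = (PySem.List.max?
              [(PySem.List.enumerate answers 0).foldl (pvG [1, 2, 3, 4, 5]) 0,
               (PySem.List.enumerate answers 0).foldl (pvG [2, 1, 2, 3, 2, 4, 2, 5]) 0,
               (PySem.List.enumerate answers 0).foldl (pvG [3, 3, 1, 1, 2, 2, 4, 4, 5, 5]) 0]
              (fun x => x)).getD 0
          then some (pr.1 + 1) else none) := by
  rw [pv_alt_unfold]
  simp only [pvPatterns, List.map_cons, List.map_nil,
    pv_fold_hist [1, 2, 3, 4, 5] (by decide) (by decide),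
    pv_fold_hist [2, 1, 2, 3, 2, 4, 2, 5] (by decide) (by decide),
    pv_fold_hist [3, 3, 1, 1, 2, 2, 4, 4, 5, 5] (by decide) (by decide),
    pv_S_empty]

-- ===== VERDICT (by name: the statement is the Claim_ definition above) =====
theorem solution_spec : Claim_equal_solution := by
  intro answers _
  unfold Spec_solution
  rw [pv_alt_eq]
  simp only [solution]
  have hAfold :
      (PySem.List.pyRange 0 (PySem.List.len answers) 1).foldl
        (fun (c : Int × Int × Int) idx =>
          let a := PySem.List.pyGetD answers idx 0
          let c := if a = PySem.Int.mod idx 5 + 1 then (c.1 + 1, c.2.1, c.2.2) else c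
          let c := if a = PySem.List.pyGetD [2, 1, 2, 3, 2, 4, 2, 5] (PySem.Int.mod idx 8) 0 then (c.1, c.2.1 + 1, c.2.2) else c
          if a = PySem.List.pyGetD [3, 3, 1, 1, 2, 2, 4, 4, 5, 5] (PySem.Int.mod idx 10) 0 then (c.1, c.2.1, c.2.2 + 1) else c)
        ((0 : Int), (0 : Int), (0 : Int)) =
      ((PySem.List.enumerate answers 0).foldl (pvG [1, 2, 3, 4, 5]) 0,
       (PySem.List.enumerate answers 0).foldl (pvG [2, 1, 2, 3, 2, 4, 2, 5]) 0,
       (PySem.List.enumerate answers 0).foldl (pvG [3, 3, 1, 1, 2, 2, 4, 4, 5, 5]) 0) := by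
    calc _ = ((PySem.List.pyRange 0 (PySem.List.len answers) 1).map
               (fun j => (j, PySem.List.pyGetD answers j 0))).foldl pvStepA ((0 : Int), (0 : Int), (0 : Int)) := by
             rw [List.foldl_map]; rfl
         _ = (PySem.List.enumerate answers 0).foldl pvStepA ((0 : Int), (0 : Int), (0 : Int)) := by
             rw [← PySem.List.enumerate_eq_map_pyRange]
         _ = _ := pv_fold_split _ 0 0 0
  rw [hAfold]
  exact pv_sel_eq _ _ _ (pv_score_nonneg _ _ _ le_rfl)
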